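-- pv_equiv track=rewrite | github.com/reaht/llm_agent | utils/data_formatter.py | _cull_rows
-- ===== SOURCE A (Python) =====
-- def _cull_rows(table, header, rows, max_chars):
--     """
--     Dynamically removes rows from the middle outward to fit within max_chars.
--     Keeps temporal start/end structure to preserve sequence comprehension.
--     """
--     header_len = len(header) + 1  # + newline
--     remaining_budget = max_chars - header_len
--     if remaining_budget <= 0:
--         return header
--
--     culled = rows.copy()
--     while True:
--         text = header + "\n" + "\n".join(culled)
--         if len(text) <= max_chars or len(culled) <= 2:
--             return text
--
--         # Remove rows from the middle outward (center → quarter points → etc.)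
--         idx = len(culled) // 2
--         del culled[idx]
-- ===== SOURCE B (Python) =====
-- def _cull_rows(table, header, rows, max_chars):
--     """Closed-form middle-cull: prefix sums of row lengths pick the surviving row count arithmetically."""
--     header_len = len(header) + 1  # + newline
--     if max_chars - header_len <= 0:
--         return header
--
--     n = len(rows)
--     pre = [0]
--     for r in rows:
--         pre.append(pre[-1] + len(r))
--
--     def text_len(m):
--         # length of header + "\n" + "\n".join of first ceil(m/2) and last floor(m/2) rows
--         return header_len + pre[(m + 1) // 2] + (pre[n] - pre[n - m // 2]) + max(m - 1, 0)
--
--     m = n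
--     while m > 2 and text_len(m) > max_chars:
--         m -= 1
--
--     kept = rows[:(m + 1) // 2] + rows[n - m // 2:]
--     return header + "\n" + "\n".join(kept)
-- ===== Notes on version B (the rewrite author's own statement) =====
-- stated objective: alternative
-- what changed: Instead of repeatedly rebuilding and measuring the joined text after each middle deletion, B precomputes prefix sums of row lengths, uses the closed form that middle deletion leaves the first ceil(m/2) and last floor(m/2) rows, finds the surviving row count m with an O(1)-per-step arithmetic length check, and builds the output text once.
import Mathlib
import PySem

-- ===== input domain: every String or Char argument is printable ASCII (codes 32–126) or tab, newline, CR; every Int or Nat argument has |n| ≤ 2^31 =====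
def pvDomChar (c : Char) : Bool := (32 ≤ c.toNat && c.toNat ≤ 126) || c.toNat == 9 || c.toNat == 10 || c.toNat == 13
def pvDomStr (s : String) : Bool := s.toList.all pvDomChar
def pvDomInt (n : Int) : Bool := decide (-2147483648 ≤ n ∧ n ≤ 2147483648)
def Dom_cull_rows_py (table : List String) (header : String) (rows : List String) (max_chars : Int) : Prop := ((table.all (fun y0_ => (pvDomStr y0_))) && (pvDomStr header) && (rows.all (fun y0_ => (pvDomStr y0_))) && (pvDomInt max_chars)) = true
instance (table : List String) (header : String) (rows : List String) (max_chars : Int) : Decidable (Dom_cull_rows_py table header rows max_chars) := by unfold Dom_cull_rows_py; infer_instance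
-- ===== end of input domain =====

-- B replaces A's rebuild-text-and-measure deletion loop by prefix sums over the row lengths,
-- computing each candidate length arithmetically and building the output text once (objective: alternative).

-- ===== PORT A =====
-- A's while-loop: state is the current `culled` list; `del culled[len(culled)//2]` is
-- eraseIdx at len/2 (the index is nonnegative and in range because len ≥ 3 in the else branch)
def cullLoopA (header : String) (max_chars : Int) (culled : List String) : String :=
  let text := header ++ "\n" ++ PySem.Str.join "\n" culled
  if PySem.Str.len text ≤ max_chars ∨ culled.length ≤ 2 then text
  else cullLoopA header max_chars (culled.eraseIdx (culled.length / 2))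
termination_by culled.length
decreasing_by
  simp only [not_or, not_le] at *
  simp only [List.length_eraseIdx]
  split <;> omega

def cull_rows_py (table : List String) (header : String) (rows : List String) (max_chars : Int) : String :=
  let header_len : Int := PySem.Str.len header + 1
  let remaining_budget := max_chars - header_len
  if remaining_budget ≤ 0 then header
  else cullLoopA header max_chars rows

-- ===== PORT B =====
-- pre = [0]; for r in rows: pre.append(pre[-1] + len(r))
def altPre (rows : List String) : List Int :=
  rows.foldl (fun p r => p ++ [PySem.List.pyGetD p (-1) 0 + PySem.Str.len r]) [0]

-- text_len(m); m is a nonnegative Python int throughout the loop, so it is a Nat here and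
-- Python's (m+1)//2, m//2 and n - m//2 are Nat `/` and `-`; the list indexings pre[...]
-- are always in range (pre has n+1 entries and m ≤ n), so they are getD
def altTextLen (header_len : Int) (pre : List Int) (n : Nat) (m : Nat) : Int :=
  header_len + pre.getD ((m + 1) / 2) 0 + (pre.getD n 0 - pre.getD (n - m / 2) 0) + max ((m : Int) - 1) 0

-- while m > 2 and text_len(m) > max_chars: m -= 1
def altLoop (max_chars : Int) (tl : Nat → Int) (m : Nat) : Nat :=
  if 2 < m ∧ max_chars < tl m then altLoop max_chars tl (m - 1) else m
termination_by m
decreasing_by omega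

def cull_rows_py_alt (table : List String) (header : String) (rows : List String) (max_chars : Int) : String :=
  let header_len : Int := PySem.Str.len header + 1
  if max_chars - header_len ≤ 0 then header
  else
    let n := rows.length
    let pre := altPre rows
    let m := altLoop max_chars (altTextLen header_len pre n) n
    let kept := PySem.List.slice rows none (some (((m + 1) / 2 : Nat) : Int)) ++
                PySem.List.slice rows (some ((n - m / 2 : Nat) : Int)) none
    header ++ "\n" ++ PySem.Str.join "\n" kept

-- ===== PRECONDITION & SPEC =====
def Spec_cull_rows_py (table : List String) (header : String) (rows : List String) (max_chars : Int) (out : String) : Prop := out = cull_rows_py_alt table header rows max_chars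
instance (table : List String) (header : String) (rows : List String) (max_chars : Int) (out : String) : Decidable (Spec_cull_rows_py table header rows max_chars out) := by unfold Spec_cull_rows_py; infer_instance

-- ===== CLAIM (what is proved, stated in full; the proofs are below) =====
def Claim_equal_cull_rows_py : Prop := ∀ (table : List String) (header : String) (rows : List String) (max_chars : Int), Dom_cull_rows_py table header rows max_chars → Spec_cull_rows_py table header rows max_chars (cull_rows_py table header rows max_chars)

-- ===== LEMMAS AND PROOFS =====

/-- sum of the lengths of the strings in a list -/
def sumLen (l : List String) : Int := (l.map PySem.Str.len).sum

/-- the rows surviving when m rows survive: first ⌈m/2⌉ and last ⌊m/2⌋ -/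
def keptAt (rows : List String) (m : Nat) : List String :=
  rows.take ((m + 1) / 2) ++ rows.drop (rows.length - m / 2)

/-- the candidate text when m rows survive -/
def textAt (header : String) (rows : List String) (m : Nat) : String :=
  header ++ "\n" ++ PySem.Str.join "\n" (keptAt rows m)

lemma chars_join_len (sep : List Char) : ∀ (ps : List (List Char)), ps ≠ [] →
    (PySem.Chars.join sep ps).length = (ps.map List.length).sum + sep.length * (ps.length - 1) := by
  intro ps
  induction ps with
  | nil => simp
  | cons p rest ih =>
    intro _
    cases rest with
    | nil => simp [PySem.Chars.join_singleton]
    | cons q t =>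
      rw [PySem.Chars.join_cons_cons]
      simp only [List.length_append, List.map_cons, List.sum_cons, List.length_cons]
      rw [ih (by simp)]
      simp only [List.map_cons, List.sum_cons, List.length_cons]
      rw [show t.length + 1 + 1 - 1 = t.length + 1 from by omega,
         show t.length + 1 - 1 = t.length from by omega, Nat.mul_succ]
      ring

lemma join_len (l : List String) (h : l ≠ []) :
    PySem.Str.len (PySem.Str.join "\n" l) = sumLen l + l.length - 1 := by
  rw [PySem.Str.len_eq, PySem.Str.toList_join]
  rw [chars_join_len _ _ (by simpa using h)]
  have hs : ∀ (l : List String), (((l.map String.toList).map List.length).sum : Int) = (l.map PySem.Str.len).sum := by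
    intro l
    induction l with
    | nil => simp
    | cons x t ih => simp [PySem.Str.len_eq, ← ih]
  have hlen : 1 ≤ l.length := List.length_pos_iff.mpr h
  push_cast [hs]
  simp only [sumLen, List.length_singleton, List.length_map]
  omega

lemma keptAt_length {rows : List String} {m : Nat} (h : m ≤ rows.length) :
    (keptAt rows m).length = m := by
  simp [keptAt]; omega

lemma keptAt_full (rows : List String) : keptAt rows rows.length = rows := by
  have : rows.length - rows.length / 2 = (rows.length + 1) / 2 := by omega
  simp [keptAt, this, List.take_append_drop]

lemma keptAt_erase {rows : List String} {m : Nat} (h3 : 3 ≤ m) (hn : m ≤ rows.length) :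
    (keptAt rows m).eraseIdx (m / 2) = keptAt rows (m - 1) := by
  unfold keptAt
  rcases Nat.even_or_odd m with he | ho
  · -- m = 2k, k ≥ 2: the erase hits the head of the back part
    obtain ⟨k, hk⟩ := he
    have hfl : (rows.take ((m + 1) / 2)).length = (m + 1) / 2 := by
      rw [List.length_take]; omega
    have hidx : (m + 1) / 2 = k := by omega
    rw [List.eraseIdx_append_of_length_le (by omega)]
    rw [hfl, hidx]
    have : m / 2 = k := by omega
    rw [this, Nat.sub_self, List.eraseIdx_zero, List.tail_drop]
    have h1 : (m - 1 + 1) / 2 = k := by omega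
    have h2 : rows.length - k + 1 = rows.length - (m - 1) / 2 := by omega
    rw [h1, h2]
  · -- m = 2k+1: the erase hits the last element of the front part
    obtain ⟨k, hk⟩ := ho
    have hfl : (rows.take ((m + 1) / 2)).length = k + 1 := by
      rw [List.length_take]; omega
    have hidx : m / 2 = k := by omega
    rw [hidx, List.eraseIdx_append_of_lt_length (by omega)]
    have h1 : (m + 1) / 2 = k + 1 := by omega
    rw [h1, List.eraseIdx_eq_take_drop_succ, List.take_take, List.drop_take]
    have h2 : (m - 1 + 1) / 2 = k := by omega
    have h3' : m / 2 = (m - 1) / 2 := by omega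
    simp [h2, ← h3', hidx]

lemma sumLen_take_add_drop (rows : List String) (k : Nat) :
    sumLen (rows.take k) + sumLen (rows.drop k) = sumLen rows := by
  simp [sumLen, ← List.sum_append]

lemma altPre_eq (rows : List String) :
    altPre rows = (List.range (rows.length + 1)).map (fun i => sumLen (rows.take i)) := by
  induction rows using List.reverseRecOn with
  | nil => simp [altPre, sumLen]
  | append_singleton rows r ih =>
    unfold altPre at *
    rw [List.foldl_append, ih]
    simp only [List.foldl_cons, List.foldl_nil]
    set f := fun i => sumLen (List.take i rows) with hf
    have hsplit : List.map f (List.range (rows.length + 1))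
        = List.map f (List.range rows.length) ++ [f rows.length] := by
      rw [List.range_succ, List.map_append, List.map_singleton]
    rw [hsplit, PySem.List.pyGetD_neg_one_append_singleton, ← hsplit]
    have hr : (rows ++ [r]).length + 1 = (rows.length + 1) + 1 := by simp
    conv_rhs => rw [hr, List.range_succ, List.map_append, List.map_singleton]
    congr 1
    · apply List.map_congr_left
      intro i hi
      rw [List.mem_range] at hi
      rw [hf]
      simp only []
      rw [List.take_append_of_le_length (by omega)]
    · rw [hf]
      simp only []
      rw [List.take_of_length_le (by simp)]
      rw [List.take_of_length_le (by omega)]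
      simp [sumLen]

lemma altPre_getD {rows : List String} {i : Nat} (h : i ≤ rows.length) :
    (altPre rows).getD i 0 = sumLen (rows.take i) := by
  rw [altPre_eq]
  rw [List.getD_eq_getElem?_getD, List.getElem?_map, List.getElem?_range (by omega)]
  simp

lemma altTextLen_eq {rows : List String} (header : String) {m : Nat} (h : m ≤ rows.length) :
    altTextLen (PySem.Str.len header + 1) (altPre rows) rows.length m
      = PySem.Str.len (textAt header rows m) := by
  have hdrop : sumLen (rows.drop (rows.length - m / 2)) =
      sumLen rows - sumLen (rows.take (rows.length - m / 2)) := by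
    have := sumLen_take_add_drop rows (rows.length - m / 2)
    omega
  unfold altTextLen textAt
  rw [altPre_getD (by omega), altPre_getD (by omega), altPre_getD (by omega)]
  rw [PySem.Str.len_append, PySem.Str.len_append]
  rcases Nat.eq_zero_or_pos m with h0 | hpos
  · subst h0
    simp [keptAt, PySem.Chars.join_nil, PySem.Str.len_eq, PySem.Str.toList_join, sumLen]
  · have hne : keptAt rows m ≠ [] := by
      have := keptAt_length (rows := rows) (m := m) h
      intro hc; rw [hc] at this; simp at this; omega
    rw [join_len _ hne, keptAt_length h]
    have hsum : sumLen (keptAt rows m)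
        = sumLen (rows.take ((m + 1) / 2)) + sumLen (rows.drop (rows.length - m / 2)) := by
      simp [keptAt, sumLen, List.map_take, List.map_drop]
    rw [hsum, hdrop]
    rw [List.take_of_length_le (le_refl _)]
    have hlen2 : PySem.Str.len "\n" = 1 := by decide
    rw [hlen2]
    have hmax : max ((m : Int) - 1) 0 = (m : Int) - 1 := by omega
    rw [hmax]
    ring

lemma altLoop_congr (mc : Int) (tl tl' : Nat → Int) : ∀ (m : Nat), (∀ k ≤ m, tl k = tl' k) →
    altLoop mc tl m = altLoop mc tl' m := by
  intro m
  induction m using Nat.strong_induction_on with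
  | _ m ih =>
    intro hk
    conv_lhs => rw [altLoop]
    conv_rhs => rw [altLoop]
    rw [hk m (le_refl m)]
    by_cases hc : 2 < m ∧ mc < tl' m
    · rw [if_pos hc, if_pos hc]
      exact ih (m - 1) (by omega) (fun k hle => hk k (by omega))
    · rw [if_neg hc, if_neg hc]

lemma loop_eq (header : String) (rows : List String) (mc : Int) : ∀ (m : Nat), m ≤ rows.length →
    cullLoopA header mc (keptAt rows m)
      = textAt header rows (altLoop mc (fun k => PySem.Str.len (textAt header rows k)) m) := by
  intro m
  induction m using Nat.strong_induction_on with
  | _ m ih =>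
    intro hm
    rw [cullLoopA, altLoop]
    simp only [keptAt_length hm]
    have ht : (header ++ "\n" ++ PySem.Str.join "\n" (keptAt rows m)) = textAt header rows m := rfl
    rw [ht]
    by_cases hc : 2 < m ∧ mc < PySem.Str.len (textAt header rows m)
    · rw [if_neg (by omega), if_pos hc, keptAt_erase (by omega) hm]
      exact ih (m - 1) (by omega) (by omega)
    · rw [if_pos (by omega), if_neg hc]

-- ===== VERDICT (by name: the statement is the Claim_ definition above) =====
theorem cull_rows_py_spec : Claim_equal_cull_rows_py := by
  intro table header rows mc _
  unfold Spec_cull_rows_py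
  simp only [cull_rows_py, cull_rows_py_alt]
  by_cases hb : mc - (PySem.Str.len header + 1) ≤ 0
  · rw [if_pos hb, if_pos hb]
  · rw [if_neg hb, if_neg hb]
    conv_lhs => rw [show rows = keptAt rows rows.length from (keptAt_full rows).symm]
    rw [loop_eq header rows mc rows.length (le_refl _)]
    rw [altLoop_congr mc (altTextLen (PySem.Str.len header + 1) (altPre rows) rows.length)
        (fun k => PySem.Str.len (textAt header rows k)) rows.length
        (fun k hk => altTextLen_eq header hk)]
    rw [PySem.List.slice_to_natCast, PySem.List.slice_from_natCast]
    rfl
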